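-- pv_equiv track=rewrite | github.com/djeada/Nauka-Programowania | src/Python/12_Napisy_anagramy_palindromy/Zad5.py | anagramy_slowa_w_zdaniu
-- ===== SOURCE A (Python) =====
-- import string
--
-- def anagramy(napis_a, napis_b):
--     """
--     Funkcja sprawdza, czy otrzymane napisy sa anagramami.
--     """
--     if len(napis_a) != len(napis_b):
--         return False
--
--     for znak in napis_a:
--         if napis_a.count(znak) != napis_b.count(znak):
--             return False
--
--     return True
--
-- def podziel_zdanie_na_slowa(zdanie):
--     """
--     Funkcja rozdziela zdanie na slowa.
--     """
--     return zdanie.translate(str.maketrans("", "", string.punctuation)).split()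
--
-- def anagramy_slowa_w_zdaniu(zdanie, slowo):
--     """
--     Funkcja zwraca liste anagramow slowa znalezionych w zdaniu.
--     """
--     slowa = podziel_zdanie_na_slowa(zdanie)
--     slowa = [s.lower() for s in slowa]
--     wynik = []
--
--     for slowo_z_zdania in slowa:
--         if anagramy(slowo_z_zdania, slowo):
--             wynik.append(slowo_z_zdania)
--
--     return wynik
-- ===== SOURCE B (Python) =====
-- import string
--
--
-- def anagramy_slowa_w_zdaniu(zdanie, slowo):
--     """Zwraca liste anagramow slowa znalezionych w zdaniu (sort-and-compare)."""
--     cel = sorted(slowo)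
--     slowa = zdanie.translate(str.maketrans("", "", string.punctuation)).split()
--     return [w for w in (s.lower() for s in slowa) if sorted(w) == cel]
-- ===== Notes on version B (the rewrite author's own statement) =====
-- stated objective: simpler
-- what changed: Replaces the helper's length check plus per-character repeated count() scans with a single precomputed sorted(slowo) signature compared against sorted(word), and the explicit accumulator loop with a comprehension.
import Mathlib
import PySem

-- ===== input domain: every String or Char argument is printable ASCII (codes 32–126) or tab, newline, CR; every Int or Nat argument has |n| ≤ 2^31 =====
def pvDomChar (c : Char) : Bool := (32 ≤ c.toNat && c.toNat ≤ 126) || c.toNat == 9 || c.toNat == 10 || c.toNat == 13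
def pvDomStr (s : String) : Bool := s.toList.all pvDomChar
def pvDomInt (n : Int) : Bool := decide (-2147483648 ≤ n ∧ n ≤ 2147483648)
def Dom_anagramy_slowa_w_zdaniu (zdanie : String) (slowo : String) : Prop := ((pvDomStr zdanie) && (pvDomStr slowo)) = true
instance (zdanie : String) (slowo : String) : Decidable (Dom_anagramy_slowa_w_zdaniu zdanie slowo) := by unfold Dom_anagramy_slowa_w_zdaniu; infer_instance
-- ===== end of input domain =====

-- B replaces A's length-plus-repeated-count anagram test by comparing against a precomputed sorted(slowo): simpler, not claimed faster.

-- ===== PORT A =====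
-- string.punctuation (ASCII); translate(...maketrans("","",punct)) deletes exactly these characters
def pvPunct : List Char := "!\"#$%&'()*+,-./:;<=>?@[\\]^_`{|}~".toList

-- the 'for znak in napis_a' loop of anagramy; str.count of a single character = List.count on toList (exact)
def pvAnagramyLoop (rest : List Char) (a b : String) : Bool :=
  match rest with
  | [] => true
  | znak :: t => if a.toList.count znak ≠ b.toList.count znak then false else pvAnagramyLoop t a b

-- helper anagramy(napis_a, napis_b)
def pvAnagramy (napis_a napis_b : String) : Bool :=
  if napis_a.toList.length ≠ napis_b.toList.length then false
  else pvAnagramyLoop napis_a.toList napis_a napis_b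

-- helper podziel_zdanie_na_slowa(zdanie)
def pvPodziel (zdanie : String) : List String :=
  PySem.Str.split₀ (String.ofList (zdanie.toList.filter (fun c => !pvPunct.contains c)))

def anagramy_slowa_w_zdaniu (zdanie : String) (slowo : String) : List String :=
  let slowa := (pvPodziel zdanie).map PySem.Str.lower
  slowa.foldl (fun wynik s => if pvAnagramy s slowo then wynik ++ [s] else wynik) []

-- ===== PORT B =====
def anagramy_slowa_w_zdaniu_alt (zdanie : String) (slowo : String) : List String :=
  let cel := PySem.List.sorted slowo.toList (fun x => x) false
  let slowa := PySem.Str.split₀ (String.ofList (zdanie.toList.filter (fun c => !pvPunct.contains c)))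
  (slowa.map PySem.Str.lower).filter
    (fun w => PySem.List.sorted w.toList (fun x => x) false == cel)

-- ===== PRECONDITION & SPEC =====
def Spec_anagramy_slowa_w_zdaniu (zdanie : String) (slowo : String) (out : List String) : Prop := out = anagramy_slowa_w_zdaniu_alt zdanie slowo
instance (zdanie : String) (slowo : String) (out : List String) : Decidable (Spec_anagramy_slowa_w_zdaniu zdanie slowo out) := by unfold Spec_anagramy_slowa_w_zdaniu; infer_instance

-- ===== CLAIM (what is proved, stated in full; the proofs are below) =====
def Claim_equal_anagramy_slowa_w_zdaniu : Prop := ∀ (zdanie : String) (slowo : String), Dom_anagramy_slowa_w_zdaniu zdanie slowo → Spec_anagramy_slowa_w_zdaniu zdanie slowo (anagramy_slowa_w_zdaniu zdanie slowo)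

-- ===== LEMMAS AND PROOFS =====

theorem pvAnagramyLoop_eq_true_iff (rest : List Char) (a b : String) :
    pvAnagramyLoop rest a b = true ↔ ∀ c ∈ rest, a.toList.count c = b.toList.count c := by
  induction rest with
  | nil => simp [pvAnagramyLoop]
  | cons x t ih =>
    simp only [pvAnagramyLoop]
    by_cases h : a.toList.count x = b.toList.count x
    · simp [h, ih]
    · simp [h]

-- A's count-based test decides exactly multiset equality (permutation of the character lists)
theorem pvAnagramy_iff_perm (a b : String) :
    pvAnagramy a b = true ↔ a.toList.Perm b.toList := by
  unfold pvAnagramy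
  by_cases hlen : a.toList.length = b.toList.length
  · rw [if_neg (by simp [hlen]), pvAnagramyLoop_eq_true_iff]
    constructor
    · intro h
      have hsub : a.toList.Subperm b.toList := by
        rw [List.subperm_ext_iff]
        intro x hx; exact le_of_eq (h x hx)
      exact hsub.perm_of_length_le (le_of_eq hlen.symm)
    · intro hp c _
      exact hp.count_eq c
  · rw [if_pos (by simpa using hlen)]
    constructor
    · intro h; exact absurd h (by simp)
    · intro hp; exact absurd hp.length_eq hlen

-- A's test agrees with B's sorted-signature test on every word
theorem pvAnagramy_eq_sorted (w slowo : String) :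
    pvAnagramy w slowo =
      (PySem.List.sorted w.toList (fun x => x) false ==
       PySem.List.sorted slowo.toList (fun x => x) false) := by
  by_cases h : w.toList.Perm slowo.toList
  · rw [(pvAnagramy_iff_perm w slowo).mpr h]
    exact (beq_iff_eq.mpr ((PySem.List.sorted_id_eq_sorted_id_iff_perm _ _).mpr h)).symm
  · have h1 : pvAnagramy w slowo = false := by
      cases hb : pvAnagramy w slowo
      · rfl
      · exact absurd ((pvAnagramy_iff_perm w slowo).mp hb) h
    rw [h1]
    have h2 : ¬ PySem.List.sorted w.toList (fun x => x) false =
        PySem.List.sorted slowo.toList (fun x => x) false := by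
      intro he; exact h ((PySem.List.sorted_id_eq_sorted_id_iff_perm _ _).mp he)
    simp [h2]

-- ===== VERDICT (by name: the statement is the Claim_ definition above) =====
theorem anagramy_slowa_w_zdaniu_spec : Claim_equal_anagramy_slowa_w_zdaniu := by
  intro zdanie slowo _
  unfold Spec_anagramy_slowa_w_zdaniu anagramy_slowa_w_zdaniu anagramy_slowa_w_zdaniu_alt
  simp only [pvPodziel]
  rw [PySem.List.foldl_append_if_eq_filter]
  simp only [List.nil_append]
  congr 1
  funext w
  exact pvAnagramy_eq_sorted w slowo
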